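-- pv_equiv track=rewrite | github.com/liusai0820/hr-hiic | hiic-hr-app/backend/app/services/question_classifier.py | _normalize_classification
-- ===== SOURCE A (Python) =====
-- from typing import Dict, List, Any, Optional, Tuple
--
-- def _normalize_classification(classification: str, valid_classifications: List[str]) -> str:
--     """标准化分类结果"""
--     # 移除可能的标点符号和空白
--     cleaned = classification.strip().strip('"\'.,;:()[]{}').upper()
--
--     # 检查完全匹配
--     for valid in valid_classifications:
--         if cleaned == valid:
--             return valid
--
--     # 检查部分匹配
--     for valid in valid_classifications:
--         if valid in cleaned:
--             return valid
--
--     # 如果无法匹配，默认使用混合查询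
--     return "HYBRID_QUERY"
-- ===== SOURCE B (Python) =====
-- from typing import List
--
-- def _normalize_classification(classification: str, valid_classifications: List[str]) -> str:
--     """标准化分类结果 — rank every substring match and select the minimum (exact beats partial, earlier beats later)."""
--     cleaned = classification.strip().strip('"\'.,;:()[]{}').upper()
--     matches = [(v != cleaned, i, v)
--                for i, v in enumerate(valid_classifications) if v in cleaned]
--     return min(matches)[2] if matches else "HYBRID_QUERY"
-- ===== Notes on version B (the rewrite author's own statement) =====
-- stated objective: alternative
-- what changed: A's two staged early-returning scans (exact first, then substring) become a single comprehension that ranks every substring match as a (not-exact, index, value) tuple and returns the lexicographic minimum, turning the priority control flow into data.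
import Mathlib
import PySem

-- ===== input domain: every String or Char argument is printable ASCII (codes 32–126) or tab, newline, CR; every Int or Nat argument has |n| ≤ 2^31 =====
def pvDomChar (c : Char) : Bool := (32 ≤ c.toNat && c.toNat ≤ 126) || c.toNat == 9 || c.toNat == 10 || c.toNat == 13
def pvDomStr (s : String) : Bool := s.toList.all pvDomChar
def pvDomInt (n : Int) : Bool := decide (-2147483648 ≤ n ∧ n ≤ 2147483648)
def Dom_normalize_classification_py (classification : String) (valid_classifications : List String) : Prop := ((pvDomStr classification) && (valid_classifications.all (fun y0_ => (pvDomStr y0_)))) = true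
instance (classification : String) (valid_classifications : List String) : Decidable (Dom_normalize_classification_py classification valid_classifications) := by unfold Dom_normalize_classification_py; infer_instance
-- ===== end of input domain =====

-- B replaces A's two staged early-returning scans by ranking every substring match as
-- (exact-flag, index, value) and selecting the lexicographic minimum (alternative algorithm).

-- ===== PORT A =====
-- cleaned = classification.strip().strip('"\'.,;:()[]{}').upper()
def pvClean (classification : String) : String :=
  PySem.Str.upper (PySem.Str.stripChars (PySem.Str.strip classification) "\"'.,;:()[]{}")

-- first loop of A: return the first valid with cleaned == valid
def pvLoopExact (cleaned : String) : List String → Option String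
  | [] => none
  | v :: vs => if cleaned == v then some v else pvLoopExact cleaned vs

-- second loop of A: return the first valid with valid in cleaned
def pvLoopPartial (cleaned : String) : List String → Option String
  | [] => none
  | v :: vs => if PySem.Str.isIn v cleaned then some v else pvLoopPartial cleaned vs

def normalize_classification_py (classification : String) (valid_classifications : List String) : String :=
  let cleaned := pvClean classification
  match pvLoopExact cleaned valid_classifications with
  | some v => v
  | none =>
    match pvLoopPartial cleaned valid_classifications with
    | some v => v
    | none => "HYBRID_QUERY"

-- ===== PORT B =====
-- Python's tuple '<' on (bool, int, str), lexicographic: False < True, then the index,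
-- then the string (ported by hand; Lean's String '<' is code-point lexicographic like Python's).
def pvLexLt (a b : Bool × Int × String) : Bool :=
  (a.1 == false && b.1 == true) ||
  (a.1 == b.1 && (a.2.1 < b.2.1 || (a.2.1 == b.2.1 && decide (a.2.2 < b.2.2))))

-- matches = [(v != cleaned, i, v) for i, v in enumerate(valid_classifications) if v in cleaned]
def pvRank (cleaned : String) (vs : List String) (s : Int) : List (Bool × Int × String) :=
  (PySem.List.enumerate vs s).filterMap
    (fun p => if PySem.Str.isIn p.2 cleaned then some (p.2 != cleaned, p.1, p.2) else none)

-- min(…) on a nonempty list: fold keeping the first minimum (Python's min semantics)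
def pvMinFold (l : List (Bool × Int × String)) (m : Bool × Int × String) : Bool × Int × String :=
  l.foldl (fun m y => if pvLexLt y m then y else m) m

def normalize_classification_py_alt (classification : String) (valid_classifications : List String) : String :=
  let cleaned := PySem.Str.upper (PySem.Str.stripChars (PySem.Str.strip classification) "\"'.,;:()[]{}")
  match pvRank cleaned valid_classifications 0 with
  | [] => "HYBRID_QUERY"
  | x :: rest => (pvMinFold rest x).2.2

-- ===== PRECONDITION & SPEC =====
def Spec_normalize_classification_py (classification : String) (valid_classifications : List String) (out : String) : Prop := out = normalize_classification_py_alt classification valid_classifications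
instance (classification : String) (valid_classifications : List String) (out : String) : Decidable (Spec_normalize_classification_py classification valid_classifications out) := by unfold Spec_normalize_classification_py; infer_instance

-- ===== CLAIM (what is proved, stated in full; the proofs are below) =====
def Claim_equal_normalize_classification_py : Prop := ∀ (classification : String) (valid_classifications : List String), Dom_normalize_classification_py classification valid_classifications → Spec_normalize_classification_py classification valid_classifications (normalize_classification_py classification valid_classifications)

-- ===== LEMMAS AND PROOFS =====

-- recurrence of the comprehension
theorem pvRank_cons (cleaned v : String) (vs : List String) (s : Int) :
    pvRank cleaned (v :: vs) s =
      if PySem.Str.isIn v cleaned then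
        (v != cleaned, s, v) :: pvRank cleaned vs (s + 1)
      else pvRank cleaned vs (s + 1) := by
  by_cases h : PySem.Chars.isIn v.toList cleaned.toList = true <;>
    simp [pvRank, PySem.List.enumerate_cons, h]

-- every index in pvRank cleaned vs s is ≥ s
theorem pvRank_idx_ge (cleaned : String) (vs : List String) (s : Int) :
    ∀ t ∈ pvRank cleaned vs s, s ≤ t.2.1 := by
  induction vs generalizing s with
  | nil => simp [pvRank, PySem.List.enumerate_nil]
  | cons v vs ih =>
    intro t ht
    rw [pvRank_cons] at ht
    split_ifs at ht with h
    · rcases List.mem_cons.mp ht with rfl | hmem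
      · simp
      · exact le_trans (by omega) (ih (s + 1) t hmem)
    · exact le_trans (by omega) (ih (s + 1) t ht)

-- the indices in pvRank are strictly increasing
theorem pvRank_pairwise (cleaned : String) (vs : List String) (s : Int) :
    (pvRank cleaned vs s).Pairwise (fun a b => a.2.1 < b.2.1) := by
  induction vs generalizing s with
  | nil => simp [pvRank, PySem.List.enumerate_nil]
  | cons v vs ih =>
    rw [pvRank_cons]
    split_ifs with h
    · refine List.Pairwise.cons ?_ (ih (s + 1))
      intro t ht
      have := pvRank_idx_ge cleaned vs (s + 1) t ht
      show s < t.2.1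
      omega
    · exact ih (s + 1)

-- first flag-false entry of the rank list ↔ A's exact-match scan
theorem pvRank_find_exact (cleaned : String) (vs : List String) (s : Int) :
    ((pvRank cleaned vs s).find? (fun t => !t.1)).map (·.2.2) = pvLoopExact cleaned vs := by
  induction vs generalizing s with
  | nil => simp [pvRank, PySem.List.enumerate_nil, pvLoopExact]
  | cons v vs ih =>
    rw [pvRank_cons]
    by_cases he : cleaned = v
    · subst he
      have hin : PySem.Str.isIn cleaned cleaned = true :=
        (PySem.Str.isIn_iff_infix _ _).mpr (List.infix_refl _)
      rw [if_pos hin]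
      simp [pvLoopExact]
    · have hbeq : (cleaned == v) = false := by simp [he]
      have hflag : (v != cleaned) = true := by
        simp only [bne_iff_ne, ne_eq]
        exact fun h => he h.symm
      by_cases hin : PySem.Str.isIn v cleaned = true
      · rw [if_pos hin]
        rw [List.find?_cons_of_neg (by simp [hflag])]
        simp [pvLoopExact, hbeq, ih (s + 1)]
      · rw [if_neg hin]
        simp [pvLoopExact, hbeq, ih (s + 1)]

-- head of the rank list ↔ A's partial-match scan
theorem pvRank_head_partial (cleaned : String) (vs : List String) (s : Int) :
    ((pvRank cleaned vs s).head?).map (·.2.2) = pvLoopPartial cleaned vs := by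
  induction vs generalizing s with
  | nil => simp [pvRank, PySem.List.enumerate_nil, pvLoopPartial]
  | cons v vs ih =>
    rw [pvRank_cons]
    by_cases hin : PySem.Str.isIn v cleaned = true
    · rw [if_pos hin]
      have hin' : PySem.Chars.isIn v.toList cleaned.toList = true := by simpa using hin
      simp [pvLoopPartial, hin']
    · rw [if_neg hin]
      simp only [pvLoopPartial]
      rw [if_neg hin]
      exact ih (s + 1)

-- a flag-false current minimum with minimal index is never replaced
theorem pvMinFold_flag_false (l : List (Bool × Int × String)) (m : Bool × Int × String)
    (hm : m.1 = false) (hidx : ∀ t ∈ l, m.2.1 < t.2.1) : pvMinFold l m = m := by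
  induction l with
  | nil => rfl
  | cons y l ih =>
    have hy : m.2.1 < y.2.1 := hidx y (by simp)
    have hlt : pvLexLt y m = false := by
      simp [pvLexLt, hm]
      intro _
      exact ⟨by omega, fun h => absurd h (by omega)⟩
    have hstep : (if pvLexLt y m = true then y else m) = m := by rw [hlt]; simp
    simp only [pvMinFold, List.foldl_cons]
    rw [hstep]
    exact ih (fun t ht => hidx t (by simp [ht]))

-- a flag-true current minimum is replaced exactly by the first flag-false entry
theorem pvMinFold_flag_true (l : List (Bool × Int × String)) (m : Bool × Int × String)
    (hm : m.1 = true) (hidx : ∀ t ∈ l, m.2.1 < t.2.1)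
    (hpair : l.Pairwise (fun a b => a.2.1 < b.2.1)) :
    pvMinFold l m = match l.find? (fun t => !t.1) with | some t => t | none => m := by
  induction l generalizing m with
  | nil => rfl
  | cons y l ih =>
    have hy : m.2.1 < y.2.1 := hidx y (by simp)
    have hrest : ∀ t ∈ l, y.2.1 < t.2.1 := fun t ht => (List.pairwise_cons.mp hpair).1 t ht
    have hpair' := (List.pairwise_cons.mp hpair).2
    cases hyf : y.1 with
    | false =>
      have hlt : pvLexLt y m = true := by simp [pvLexLt, hyf, hm]
      have hstep : (if pvLexLt y m = true then y else m) = y := by rw [hlt]; simp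
      have h2 := pvMinFold_flag_false l y hyf hrest
      have hfy : List.find? (fun t => !t.1) (y :: l) = some y :=
        List.find?_cons_of_pos (by simp [hyf])
      simp only [pvMinFold, List.foldl_cons] at h2 ⊢
      rw [hstep, h2, hfy]
    | true =>
      have hlt : pvLexLt y m = false := by
        simp [pvLexLt, hyf, hm]
        exact ⟨by omega, fun h => absurd h (by omega)⟩
      have hstep : (if pvLexLt y m = true then y else m) = m := by rw [hlt]; simp
      have hfy : List.find? (fun t => !t.1) (y :: l) = List.find? (fun t => !t.1) l :=
        List.find?_cons_of_neg (by simp [hyf])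
      have h2 := ih m hm (fun t ht => hidx t (by simp [ht])) hpair'
      simp only [pvMinFold, List.foldl_cons] at h2 ⊢
      rw [hstep, h2, hfy]

-- the two decision procedures agree for every cleaned string
theorem pvKey (cleaned : String) (vs : List String) :
    (match pvLoopExact cleaned vs with
     | some v => v
     | none =>
       match pvLoopPartial cleaned vs with
       | some v => v
       | none => "HYBRID_QUERY") =
    (match pvRank cleaned vs 0 with
     | [] => "HYBRID_QUERY"
     | x :: rest => (pvMinFold rest x).2.2) := by
  have hfind := pvRank_find_exact cleaned vs 0
  have hhead := pvRank_head_partial cleaned vs 0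
  have hpair := pvRank_pairwise cleaned vs 0
  cases hR : pvRank cleaned vs 0 with
  | nil =>
    rw [hR] at hfind hhead
    simp only [List.find?_nil, Option.map_none, List.head?_nil] at hfind hhead
    rw [← hfind, ← hhead]
  | cons x rest =>
    rw [hR] at hfind hhead hpair
    have hrest : ∀ t ∈ rest, x.2.1 < t.2.1 := fun t ht => (List.pairwise_cons.mp hpair).1 t ht
    have hpair' := (List.pairwise_cons.mp hpair).2
    cases hxf : x.1 with
    | false =>
      have hm := pvMinFold_flag_false rest x hxf hrest
      rw [List.find?_cons_of_pos (by simp [hxf])] at hfind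
      simp only [Option.map_some] at hfind
      rw [← hfind]
      simp [hm]
    | true =>
      have hm := pvMinFold_flag_true rest x hxf hrest hpair'
      rw [List.find?_cons_of_neg (by simp [hxf])] at hfind
      cases hf : rest.find? (fun t => !t.1) with
      | some t =>
        rw [hf] at hfind hm
        simp only [Option.map_some] at hfind
        rw [← hfind]
        simp [hm]
      | none =>
        rw [hf] at hfind hm
        simp only [Option.map_none] at hfind
        simp only [List.head?_cons, Option.map_some] at hhead
        rw [← hfind, ← hhead]
        simp [hm]

-- ===== VERDICT (by name: the statement is the Claim_ definition above) =====
theorem normalize_classification_py_spec : Claim_equal_normalize_classification_py := by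
  intro c vs _
  exact pvKey (pvClean c) vs
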